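-- pv_equiv track=rewrite | github.com/bca44/cs110 | Unit5/homework5c/value_count.py | count
-- ===== SOURCE A (Python) =====
-- def count(string_list, index):
--     """
--     returns dict
--     keys: unique items in specified column
--     values: frequency of said item
--     """
--     count_dict = {}
--
--     for string in string_list:
--         string = string.split(",")
--         item = string[index].strip()
--
--         if item not in count_dict:
--             count_dict[item] = 0
--         count_dict[item] += 1
--
--     return count_dict
-- ===== SOURCE B (Python) =====
-- def count(string_list, index):
--     keys = [s.split(",")[index].strip() for s in string_list]
--     result = {}
--     while keys:
--         k = keys[0]
--         rest = [x for x in keys[1:] if x != k]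
--         result[k] = len(keys) - len(rest)
--         keys = rest
--     return result
-- ===== Notes on version B (the rewrite author's own statement) =====
-- stated objective: alternative
-- what changed: B materialises the per-row key list and then tallies it by repeated partitioning: it takes the first key, removes all of its occurrences with a filter, records the count as the length difference, and recurses on the shrunken remainder -- no dictionary membership tests or per-element tally at all.
import Mathlib
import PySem

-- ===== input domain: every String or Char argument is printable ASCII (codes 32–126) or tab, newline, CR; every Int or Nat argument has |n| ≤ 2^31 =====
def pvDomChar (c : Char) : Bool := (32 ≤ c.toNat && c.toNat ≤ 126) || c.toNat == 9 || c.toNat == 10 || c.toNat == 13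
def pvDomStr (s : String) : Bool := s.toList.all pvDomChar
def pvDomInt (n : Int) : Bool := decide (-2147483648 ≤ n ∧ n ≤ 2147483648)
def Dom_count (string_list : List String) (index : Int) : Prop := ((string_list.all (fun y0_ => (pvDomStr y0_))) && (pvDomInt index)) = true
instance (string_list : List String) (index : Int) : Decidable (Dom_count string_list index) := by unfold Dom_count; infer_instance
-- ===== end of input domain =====

-- B tallies the per-row key list by repeated partitioning (filter out the head key, count by length difference) instead of A's single-pass dict accumulation (alternative decomposition, same result).


-- ===== PORT A =====
def count (string_list : List String) (index : Int) : List (String × Int) :=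
  (string_list.foldl (fun (d : PySem.Dict String Int) s =>
     match PySem.List.pyGet? ((PySem.Str.split? s ",").getD []) index with
     | none => d  -- IndexError in Python; excluded by Pre_count
     | some raw =>
       let item := PySem.Str.strip raw
       let d1 := if d.contains item then d else d.insert item 0
       d1.insert item (d1.getD item 0 + 1)) PySem.Dict.empty).items

-- ===== PORT B =====
-- the while loop of B: pick the head key, filter it out, count by length difference, recurse
def tallyRuns (keys : List String) : List (String × Int) :=
  match keys with
  | [] => []
  | k :: ks =>
    let rest := ks.filter (fun x => x ≠ k)
    (k, ((1 + ks.length) - rest.length : Int)) :: tallyRuns rest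
termination_by keys.length
decreasing_by
  simp only [List.length_cons, List.length_unattach]
  exact Nat.lt_succ_of_le (le_trans (List.length_filter_le _ _) (by simp))

def count_alt (string_list : List String) (index : Int) : List (String × Int) :=
  tallyRuns (string_list.map (fun s =>
    PySem.Str.strip (PySem.List.pyGetD ((PySem.Str.split? s ",").getD []) index "")))

-- ===== PRECONDITION & SPEC =====
-- Pre_ excludes exactly the rows on which A raises IndexError: index out of range of the row's split.
def Pre_count (string_list : List String) (index : Int) : Prop :=
  ∀ s ∈ string_list, PySem.Raise.InRange ((PySem.Str.split? s ",").getD []).length index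
instance (string_list : List String) (index : Int) : Decidable (Pre_count string_list index) := by
  unfold Pre_count; infer_instance
def pvWitness_count : List String × Int := (["a, b", "c,b", "a,b"], 1)
def Spec_count (string_list : List String) (index : Int) (out : List (String × Int)) : Prop := out = count_alt string_list index
instance (string_list : List String) (index : Int) (out : List (String × Int)) : Decidable (Spec_count string_list index out) := by unfold Spec_count; infer_instance

-- ===== CLAIM (what is proved, stated in full; the proofs are below) =====
def Claim_equal_count : Prop := ∀ (string_list : List String) (index : Int), Dom_count string_list index → Pre_count string_list index → Spec_count string_list index (count string_list index)

-- ===== LEMMAS AND PROOFS =====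

-- A's per-row dict update is exactly Counter's update.
theorem count_step_eq (d : PySem.Dict String Int) (k : String) :
    (let d1 := if d.contains k then d else d.insert k 0;
     d1.insert k (d1.getD k 0 + 1)) = d.modify k 0 (· + 1) := by
  by_cases h : d.contains k
  · simp [h, PySem.Dict.modify, PySem.Dict.getD_eq_get?_getD]
  · simp [h, PySem.Dict.insert_insert_self, PySem.Dict.modify,
      PySem.Dict.getD_of_not_contains d 0 (by simpa using h)]

theorem pyGet?_eq_some_pyGetD {α : Type} (xs : List α) (i : Int) (d : α)
    (h : PySem.Raise.InRange xs.length i) :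
    PySem.List.pyGet? xs i = some (PySem.List.pyGetD xs i d) := by
  rcases ho : PySem.List.pyGet? xs i with _ | v
  · exact absurd ((PySem.List.pyGet?_eq_none_iff xs i).mp ho) (not_not_intro h)
  · simp [PySem.List.pyGetD, ho]

-- adding an element already in the set is a no-op, so later copies of a counted key can be filtered out
theorem foldl_add_mem_filter (k : String) :
    ∀ (ks : List String) (acc : PySem.Set String), k ∈ acc →
      List.foldl PySem.Set.add acc ks = List.foldl PySem.Set.add acc (ks.filter (fun x => x ≠ k))
  | [], _, _ => rfl
  | a :: ks, acc, h => by
    by_cases ha : a = k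
    · subst ha
      simp only [List.foldl_cons, List.filter_cons, decide_not]
      have hadd : PySem.Set.add acc a = acc := by
        unfold PySem.Set.add PySem.Set.contains; simp [h]
      simp [hadd, foldl_add_mem_filter a ks acc h]
    · simp only [List.foldl_cons, List.filter_cons]
      have hmem : k ∈ PySem.Set.add acc a := by
        unfold PySem.Set.add; split <;> simp [h]
      simp [ha, List.foldl_cons, foldl_add_mem_filter k ks (PySem.Set.add acc a) hmem]

theorem foldl_add_cons_notmem (k : String) :
    ∀ (ks : List String) (acc : List String), k ∉ ks →
      List.foldl PySem.Set.add (k :: acc) ks = k :: List.foldl PySem.Set.add acc ks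
  | [], _, _ => rfl
  | a :: ks, acc, h => by
    have hak : (a == k) = false := by simp; rintro rfl; exact h (by simp)
    have hstep : PySem.Set.add (k :: acc) a = k :: PySem.Set.add acc a := by
      unfold PySem.Set.add PySem.Set.contains
      simp only [List.contains_cons, hak, Bool.false_or]
      split <;> simp_all
    simp only [List.foldl_cons, hstep,
      foldl_add_cons_notmem k ks (PySem.Set.add acc a) (fun hm => h (List.mem_cons_of_mem _ hm))]

-- first-occurrence dedup peels off the head and its later copies
theorem dedup_cons_eq (k : String) (ks : List String) :
    PySem.List.dedup (k :: ks) = k :: PySem.List.dedup (ks.filter (fun x => x ≠ k)) := by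
  show List.foldl PySem.Set.add [k] ks = _
  rw [foldl_add_mem_filter k ks [k] (by simp)]
  exact foldl_add_cons_notmem k _ [] (by simp)

theorem count_add_filter_length (ks : List String) (k : String) :
    ks.count k + (ks.filter (fun x => x ≠ k)).length = ks.length := by
  induction ks with
  | nil => rfl
  | cons a t ih =>
    simp only [decide_not] at ih ⊢
    by_cases h : a = k <;> simp [h] <;> omega

-- the counter's items list in first-occurrence order is exactly B's partition tally
theorem dedup_map_count_eq_tallyRuns (ks : List String) :
    (PySem.List.dedup ks).map (fun k => (k, (ks.count k : Int))) = tallyRuns ks := by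
  induction ks using tallyRuns.induct with
  | case1 => simp [PySem.List.dedup, PySem.Set.ofList, tallyRuns]
  | case2 k ks rest ih =>
    simp only [rest, List.unattach_filter, List.unattach_attach] at ih
    rw [tallyRuns, dedup_cons_eq, List.map_cons]
    refine congrArg₂ _ ?_ ?_
    · have h1 := count_add_filter_length ks k
      have h2 : (List.filter (fun x => decide (x ≠ k)) ks).length ≤ ks.length :=
        List.length_filter_le _ _
      simp only [List.count_cons_self, Prod.mk.injEq, true_and]
      simp only [decide_not] at h1 ⊢
      push_cast
      omega
    · rw [← ih]
      refine List.map_congr_left (fun x hx => ?_)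
      have hxr : x ∈ List.filter (fun y => y ≠ k) ks := (PySem.List.mem_dedup _ _).mp hx
      have hxk : x ≠ k := by
        have := List.of_mem_filter hxr
        simpa using this
      refine congrArg _ (congrArg _ ?_)
      simp [List.count_filter, hxk, Ne.symm hxk]

-- ===== VERDICT (by name: the statement is the Claim_ definition above) =====
theorem count_spec : Claim_equal_count := by
  intro string_list index _ hpre
  unfold Spec_count count count_alt
  have hd : List.foldl (fun (d : PySem.Dict String Int) s =>
      match PySem.List.pyGet? ((PySem.Str.split? s ",").getD []) index with
      | none => d
      | some raw =>
        let item := PySem.Str.strip raw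
        let d1 := if d.contains item then d else d.insert item 0
        d1.insert item (d1.getD item 0 + 1)) PySem.Dict.empty string_list
      = PySem.Dict.counter (string_list.map (fun s =>
          PySem.Str.strip (PySem.List.pyGetD ((PySem.Str.split? s ",").getD []) index ""))) := by
    rw [PySem.Dict.counter_eq_foldl, List.foldl_map]
    exact PySem.List.foldl_congr_mem _ _ _ _ (fun acc s hs => by
      rw [pyGet?_eq_some_pyGetD _ _ "" (hpre s hs)]
      exact count_step_eq acc _)
  rw [hd, PySem.Dict.items_counter, ← PySem.List.dedup_eq_ofList]
  exact dedup_map_count_eq_tallyRuns _
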